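-- pv_equiv track=rewrite | github.com/ToraNova/library | guides/python/cryptopals/b64.py | isb64
-- ===== SOURCE A (Python) =====
-- b64lkup = [
--         'A','B','C','D','E','F','G','H','I','J',
--         'K','L','M','N','O','P','Q','R','S','T',
--         'U','V','W','X','Y','Z',
--         'a','b','c','d','e','f','g','h','i','j',
--         'k','l','m','n','o','p','q','r','s','t',
--         'u','v','w','x','y','z',
--         '0','1','2','3','4','5','6','7','8','9',
--         '+','/'
--         ]
--
-- def isb64(s):
--     #ensure string is valid
--     for idx,c in enumerate(s):
--         if c not in b64lkup:
--             if c == '=':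
--                 if idx == len(s)-1:
--                     # last char, valid
--                     break
--                 elif idx == len(s)-2:
--                     # second last, last should be padded
--                     if s[idx+1] == '=':
--                         break
--             return -idx
--     return 1
-- ===== SOURCE B (Python) =====
-- B64SET = frozenset(
--     "ABCDEFGHIJKLMNOPQRSTUVWXYZabcdefghijklmnopqrstuvwxyz0123456789+/")
--
-- def isb64(s):
--     # strip an optional trailing run of one or two '=' padding chars,
--     # then the string is valid iff everything left is base64 alphabet
--     if s.endswith('=='):
--         body = s[:-2]
--     elif s.endswith('='):
--         body = s[:-1]
--     else:
--         body = s
--     if all(c in B64SET for c in body):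
--         return 1
--     return -next(i for i, c in enumerate(s) if c not in B64SET)
-- ===== Notes on version B (the rewrite author's own statement) =====
-- stated objective: faster
-- what changed: A scans with enumerate, testing each char against a 64-element list and deciding padding validity by index arithmetic inside the loop; B strips an optional trailing run of one or two padding chars, then does a plain all-chars-in-a-frozenset check, falling back to the first non-alphabet index only for invalid input.
import Mathlib
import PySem

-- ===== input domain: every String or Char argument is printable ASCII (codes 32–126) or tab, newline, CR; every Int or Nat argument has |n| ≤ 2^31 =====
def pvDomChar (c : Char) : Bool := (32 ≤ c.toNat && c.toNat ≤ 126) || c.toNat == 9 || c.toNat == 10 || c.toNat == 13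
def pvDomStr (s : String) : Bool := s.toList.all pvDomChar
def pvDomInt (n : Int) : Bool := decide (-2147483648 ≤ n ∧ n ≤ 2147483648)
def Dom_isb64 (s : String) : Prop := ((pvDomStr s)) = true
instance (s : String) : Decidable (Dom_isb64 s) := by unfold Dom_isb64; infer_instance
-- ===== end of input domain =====

-- B replaces A's index-tracking scan (per-char membership in a 64-element list, padding
-- decided by index arithmetic in the loop) with "strip up to two trailing padding chars,
-- then a plain frozenset alphabet check"; measured faster by a constant factor.

-- ===== PORT A =====
def b64lkup : List Char :=
  ['A','B','C','D','E','F','G','H','I','J',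
   'K','L','M','N','O','P','Q','R','S','T',
   'U','V','W','X','Y','Z',
   'a','b','c','d','e','f','g','h','i','j',
   'k','l','m','n','o','p','q','r','s','t',
   'u','v','w','x','y','z',
   '0','1','2','3','4','5','6','7','8','9',
   '+','/']

-- the for-loop over enumerate(s); `break` jumps to the trailing `return 1`
def isb64Loop (cs : List Char) : List (Int × Char) → Int
  | [] => 1
  | (idx, c) :: rest =>
    if c ∉ b64lkup then
      if c = '=' then
        if idx = (cs.length : Int) - 1 then 1
        else if idx = (cs.length : Int) - 2 then
          if PySem.List.pyGet? cs (idx + 1) = some '=' then 1 else -idx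
        else -idx
      else -idx
    else isb64Loop cs rest

def isb64 (s : String) : Int :=
  isb64Loop s.toList (PySem.List.enumerate s.toList 0)

-- ===== PORT B =====
def b64set : PySem.Set Char :=
  PySem.Set.ofList
    "ABCDEFGHIJKLMNOPQRSTUVWXYZabcdefghijklmnopqrstuvwxyz0123456789+/".toList

def isb64_alt (s : String) : Int :=
  let cs := s.toList
  let body : List Char :=
    if PySem.Str.endswith s "==" then PySem.List.slice cs none (some (-2))
    else if PySem.Str.endswith s "=" then PySem.List.slice cs none (some (-1))
    else cs
  if body.all (fun c => PySem.Set.contains b64set c) then 1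
  else
    -- next(i for i, c in enumerate(s) if c not in B64SET); always found here,
    -- since body is a prefix of s and contains a non-alphabet char
    match (PySem.List.enumerate cs 0).find? (fun p => !(PySem.Set.contains b64set p.2)) with
    | some p => -p.1
    | none => 0

-- ===== PRECONDITION & SPEC =====
def Spec_isb64 (s : String) (out : Int) : Prop := out = isb64_alt s
instance (s : String) (out : Int) : Decidable (Spec_isb64 s out) := by unfold Spec_isb64; infer_instance

-- ===== CLAIM (what is proved, stated in full; the proofs are below) =====
def Claim_equal_isb64 : Prop := ∀ (s : String), Dom_isb64 s → Spec_isb64 s (isb64 s)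

-- ===== LEMMAS AND PROOFS =====

-- "c is not in the base64 alphabet"
def pbad (c : Char) : Bool := !(b64lkup.contains c)

-- the common reference value: 1 when valid, else minus the first bad index
def refVal (cs : List Char) : Int :=
  match cs.findIdx? pbad with
  | none => 1
  | some m =>
    if cs.getD m ' ' = '=' ∧
        (m + 1 = cs.length ∨ (m + 2 = cs.length ∧ cs[m+1]? = some '=')) then 1
    else -(m : Int)

set_option maxRecDepth 4000 in
lemma b64set_eq : b64set = b64lkup := by decide

lemma contains_b64set (c : Char) :
    PySem.Set.contains b64set c = b64lkup.contains c := by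
  rw [b64set_eq]; simp [pysem]

lemma findIdx?_spec {α : Type} (d : α) (p : α → Bool) (cs : List α) (m : Nat)
    (h : cs.findIdx? p = some m) :
    m < cs.length ∧ p (cs.getD m d) = true ∧ ∀ i < m, p (cs.getD i d) = false := by
  induction cs generalizing m with
  | nil => simp at h
  | cons c rest ih =>
    rw [List.findIdx?_cons] at h
    by_cases hc : p c = true
    · simp [hc] at h
      subst h
      refine ⟨by simp, by simpa using hc, by omega⟩
    · simp [hc] at h
      obtain ⟨m', hm', rfl⟩ := h
      obtain ⟨h1, h2, h3⟩ := ih m' hm'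
      refine ⟨by simpa using h1, by simpa using h2, ?_⟩
      intro i hi
      match i with
      | 0 => simpa using (by simpa using hc)
      | i + 1 => simpa using h3 i (by omega)

lemma loopA (suf : List Char) : ∀ (cs : List Char) (k : Nat), cs.drop k = suf →
    isb64Loop cs (PySem.List.enumerate suf (k : Int)) =
      (match suf.findIdx? pbad with
       | none => 1
       | some m =>
         if suf.getD m ' ' = '=' ∧
             (k + m + 1 = cs.length ∨
              (k + m + 2 = cs.length ∧ cs[k+m+1]? = some '=')) then 1
         else -((k + m : Nat) : Int)) := by
  induction suf with
  | nil =>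
    intro cs k h
    simp [PySem.List.enumerate, isb64Loop]
  | cons c rest ih =>
    intro cs k h
    have hk : k < cs.length := by
      by_contra hk
      rw [List.drop_eq_nil_of_le (by omega)] at h
      simp at h
    have hdrop : cs.drop (k + 1) = rest := by
      have : cs.drop (k + 1) = (cs.drop k).drop 1 := by
        rw [List.drop_drop]
      rw [this, h, List.drop_one, List.tail_cons]
    have hget : cs[k]? = some c := by
      have h0 : (cs.drop k)[0]? = cs[k + 0]? := List.getElem?_drop
      rw [h] at h0
      simpa using h0.symm
    rw [PySem.List.enumerate_cons, List.findIdx?_cons]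
    by_cases hc : pbad c = true
    · have hmem : c ∉ b64lkup := by
        simp [pbad] at hc
        simpa using hc
      simp only [hc, isb64Loop, hmem, if_pos, not_false_eq_true]
      have hcast1 : (k : Int) + 1 = ((k + 1 : Nat) : Int) := by push_cast; ring
      rw [hcast1, PySem.List.pyGet?_natCast]
      have e1 : ((k : Int) = (cs.length : Int) - 1) ↔ (k + 0 + 1 = cs.length) := by omega
      have e2 : ((k : Int) = (cs.length : Int) - 2) ↔ (k + 0 + 2 = cs.length) := by omega
      simp only [List.getD_cons_zero]
      by_cases hq : c = '='
      · simp only [hq, true_and]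
        split_ifs with h1 h2 h3 <;> simp_all
      · simp only [if_neg hq]
        rw [if_neg (by simp [hq])]
        simp
    · have hmem : c ∈ b64lkup := by
        simp [pbad] at hc
        simpa using hc
      simp only [hc, if_false, Bool.false_eq_true, isb64Loop, hmem, not_true_eq_false]
      have hcast1 : (k : Int) + 1 = ((k + 1 : Nat) : Int) := by push_cast; ring
      rw [hcast1, ih cs (k + 1) hdrop]
      cases hfi : rest.findIdx? pbad with
      | none => simp
      | some m =>
        simp only [Option.map_some]
        have g1 : (c :: rest).getD (m + 1) ' ' = rest.getD m ' ' := by simp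
        have a1 : k + (m + 1) = (k + 1) + m := by omega
        simp only [g1, a1]

lemma A_eq_ref (s : String) : isb64 s = refVal s.toList := by
  unfold isb64 refVal
  have h := loopA s.toList s.toList 0 (by simp)
  simp only [Nat.cast_zero] at h
  rw [h]
  cases s.toList.findIdx? pbad with
  | none => rfl
  | some m => simp

lemma find?_enumerate (cs : List Char) (p : Char → Bool) : ∀ (k : Int),
    (PySem.List.enumerate cs k).find? (fun q => p q.2) =
      (cs.findIdx? p).map (fun (m : Nat) => (k + (m : Int), cs.getD m ' ')) := by
  induction cs with
  | nil => intro k; simp [PySem.List.enumerate]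
  | cons c rest ih =>
    intro k
    rw [PySem.List.enumerate_cons, List.find?_cons, List.findIdx?_cons]
    by_cases hc : p c = true
    · simp [hc]
    · simp only [Bool.not_eq_true] at hc
      simp only [hc, if_false, Bool.false_eq_true]
      rw [ih (k + 1)]
      cases rest.findIdx? p with
      | none => simp
      | some m => simp; omega

lemma drop_of_succ_eq (cs : List Char) (i : Nat) (h : i + 1 = cs.length) :
    cs.drop i = [cs.getD i ' '] := by
  rw [List.drop_eq_getElem_cons (by omega), List.drop_eq_nil_of_le (by omega),
    List.getD_eq_getElem cs ' ' (by omega)]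

lemma drop_of_add_two_eq (cs : List Char) (i : Nat) (h : i + 2 = cs.length) :
    cs.drop i = [cs.getD i ' ', cs.getD (i + 1) ' '] := by
  rw [List.drop_eq_getElem_cons (by omega), drop_of_succ_eq cs (i + 1) (by omega),
    List.getD_eq_getElem cs ' ' (show i < cs.length by omega),
    List.getD_eq_getElem cs ' ' (show i + 1 < cs.length by omega)]

lemma sfx1 (cs : List Char) :
    (['='] <:+ cs) ↔ 1 ≤ cs.length ∧ cs.getD (cs.length - 1) ' ' = '=' := by
  constructor
  · intro h
    have hl : 1 ≤ cs.length := by simpa using h.length_le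
    rw [List.suffix_iff_eq_drop, show (['='] : List Char).length = 1 from rfl] at h
    rw [drop_of_succ_eq cs (cs.length - 1) (by omega)] at h
    simp at h
    exact ⟨hl, h.symm⟩
  · rintro ⟨hl, h1⟩
    rw [List.suffix_iff_eq_drop, show (['='] : List Char).length = 1 from rfl]
    rw [drop_of_succ_eq cs (cs.length - 1) (by omega), h1]

lemma sfx2 (cs : List Char) :
    (['=','='] <:+ cs) ↔
      2 ≤ cs.length ∧ cs.getD (cs.length - 2) ' ' = '=' ∧
        cs.getD (cs.length - 1) ' ' = '=' := by
  constructor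
  · intro h
    have hl : 2 ≤ cs.length := by simpa using h.length_le
    rw [List.suffix_iff_eq_drop, show (['=','='] : List Char).length = 2 from rfl] at h
    rw [drop_of_add_two_eq cs (cs.length - 2) (by omega)] at h
    simp at h
    exact ⟨hl, h.1.symm, by rw [show cs.length - 1 = cs.length - 2 + 1 by omega]; exact h.2.symm⟩
  · rintro ⟨hl, h1, h2⟩
    rw [List.suffix_iff_eq_drop, show (['=','='] : List Char).length = 2 from rfl]
    rw [drop_of_add_two_eq cs (cs.length - 2) (by omega), h1,
      show cs.length - 2 + 1 = cs.length - 1 by omega, h2]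

lemma take_all_good (cs : List Char) (j m : Nat)
    (hmin : ∀ i < m, pbad (cs.getD i ' ') = false) (hj : j ≤ m) :
    (cs.take j).all (fun c => b64lkup.contains c) = true := by
  rw [List.all_eq_true]
  intro c hc
  obtain ⟨i, hi, rfl⟩ := List.mem_iff_getElem.mp hc
  have hi' : i < cs.length := by simp [List.length_take] at hi; omega
  have hbad := hmin i (by simp [List.length_take] at hi; omega)
  rw [List.getD_eq_getElem cs ' ' hi'] at hbad
  rw [List.getElem_take]
  simpa [pbad] using hbad

lemma take_all_bad (cs : List Char) (j m : Nat) (hm : m < cs.length) (hj : m < j)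
    (hpm : pbad (cs.getD m ' ') = true) :
    (cs.take j).all (fun c => b64lkup.contains c) = false := by
  rw [List.all_eq_false]
  have hlt : m < (cs.take j).length := by simp [List.length_take]; omega
  refine ⟨(cs.take j)[m], List.getElem_mem hlt, ?_⟩
  rw [List.getElem_take, ← List.getD_eq_getElem cs ' ' hm]
  simpa [pbad] using hpm

lemma B_eq_ref (s : String) : isb64_alt s = refVal s.toList := by
  unfold isb64_alt
  simp only [PySem.Str.endswith_eq, contains_b64set,
    show ("==" : String).toList = ['=','='] from rfl,
    show ("=" : String).toList = ['='] from rfl]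
  generalize s.toList = cs
  cases hfi : cs.findIdx? pbad with
  | none =>
    have hall : ∀ c ∈ cs, pbad c = false := List.findIdx?_eq_none_iff.mp hfi
    have hne : ('=' : Char) ∉ cs := fun hmem => by
      have := hall _ hmem
      rw [show pbad '=' = true from by decide] at this
      simp at this
    have h2 : ¬ (PySem.Chars.endswith cs ['=','='] = true) := by
      rw [PySem.Chars.endswith_iff]
      intro h
      exact hne (h.subset (by simp))
    have h1 : ¬ (PySem.Chars.endswith cs ['='] = true) := by
      rw [PySem.Chars.endswith_iff]
      intro h
      exact hne (h.subset (by simp))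
    rw [if_neg h2, if_neg h1, if_pos ?_, refVal, hfi]
    rw [List.all_eq_true]
    intro c hc
    simpa [pbad] using hall c hc
  | some m =>
    obtain ⟨hm, hpm, hmin⟩ := findIdx?_spec ' ' pbad cs m hfi
    have hpmt : pbad ('=' : Char) = true := by decide
    have hfind : List.find? (fun p => !(b64lkup.contains p.2))
        (PySem.List.enumerate cs 0) = some ((0 : Int) + (m : Int), cs.getD m ' ') := by
      rw [show (fun (p : Int × Char) => !(b64lkup.contains p.2)) = (fun p => pbad p.2) from rfl,
        find?_enumerate, hfi]
      rfl
    rw [refVal, hfi]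
    show _ = if cs.getD m ' ' = '=' ∧
        (m + 1 = cs.length ∨ m + 2 = cs.length ∧ cs[m + 1]? = some '=') then 1 else -(m : Int)
    by_cases h2 : PySem.Chars.endswith cs ['=','='] = true
    · obtain ⟨hl, hp2, hp1⟩ := (sfx2 cs).mp ((PySem.Chars.endswith_iff cs _).mp h2)
      rw [if_pos h2, PySem.List.slice_to_neg_ofNat cs 2 (by omega)]
      have hm2 : m ≤ cs.length - 2 := by
        by_contra hcon
        rw [not_le] at hcon
        have := hmin (cs.length - 2) (by omega)
        rw [hp2] at this
        simp [hpmt] at this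
      by_cases hm3 : m = cs.length - 2
      · rw [if_pos (take_all_good cs (cs.length - 2) m hmin (by omega)),
          if_pos ?_]
        subst hm3
        refine ⟨hp2, Or.inr ⟨by omega, ?_⟩⟩
        rw [List.getElem?_eq_getElem (by omega), ← List.getD_eq_getElem cs ' ' (by omega),
          show cs.length - 2 + 1 = cs.length - 1 by omega, hp1]
      · rw [if_neg (by rw [take_all_bad cs (cs.length - 2) m hm (by omega) hpm]; simp),
          hfind, if_neg ?_]
        · norm_num
        · rintro ⟨-, h | ⟨h, -⟩⟩ <;> omega
    · by_cases h1 : PySem.Chars.endswith cs ['='] = true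
      · obtain ⟨hl, hp1⟩ := (sfx1 cs).mp ((PySem.Chars.endswith_iff cs _).mp h1)
        rw [if_neg h2, if_pos h1, PySem.List.slice_to_neg_one, List.dropLast_eq_take]
        have hm1 : m ≤ cs.length - 1 := by
          by_contra hcon
          rw [not_le] at hcon
          have := hmin (cs.length - 1) (by omega)
          rw [hp1] at this
          simp [hpmt] at this
        by_cases hm3 : m = cs.length - 1
        · rw [if_pos (take_all_good cs (cs.length - 1) m hmin (by omega)),
            if_pos ?_]
          subst hm3
          exact ⟨hp1, Or.inl (by omega)⟩
        · rw [if_neg (by rw [take_all_bad cs (cs.length - 1) m hm (by omega) hpm]; simp),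
            hfind, if_neg ?_]
          · norm_num
          · rintro ⟨hq, h | ⟨h, hg⟩⟩
            · omega
            · -- then cs ends in "==", contradicting h2
              apply h2
              rw [PySem.Chars.endswith_iff, sfx2]
              refine ⟨by omega, ?_, hp1⟩
              rw [show cs.length - 2 = m by omega]
              exact hq
      · rw [if_neg h2, if_neg h1]
        have hlast : ¬ (cs.getD (cs.length - 1) ' ' = '=') := by
          intro hg
          exact h1 ((PySem.Chars.endswith_iff cs _).mpr ((sfx1 cs).mpr ⟨by omega, hg⟩))
        have hcsq : cs = cs.take cs.length := by rw [List.take_length]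
        rw [if_neg ?_, hfind, if_neg ?_]
        · norm_num
        · rintro ⟨hq, h | ⟨h, hg⟩⟩
          · apply hlast
            rw [show cs.length - 1 = m by omega]
            exact hq
          · apply hlast
            rw [List.getElem?_eq_getElem (by omega), ← List.getD_eq_getElem cs ' ' (by omega)] at hg
            rw [show cs.length - 1 = m + 1 by omega]
            simpa using hg
        · rw [hcsq, take_all_bad cs cs.length m hm (by omega) hpm]
          simp

-- ===== VERDICT (by name: the statement is the Claim_ definition above) =====
theorem isb64_spec : Claim_equal_isb64 := by
  intro s _
  unfold Spec_isb64
  rw [A_eq_ref, B_eq_ref]
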